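-- pv_equiv track=rewrite | github.com/kloppi417/High-Level-Brainfuck | utils/functions.py | generate_bf_number
-- ===== SOURCE A (Python) =====
-- def find_factors(n):
--     unorganized_factors: list[int] = []
--     factors: list[tuple[int, int]] = []
--
--     for i in range(1, n + 1):
--         if n % i == 0:
--             unorganized_factors.append(i)
--
--     length = len(unorganized_factors) / 2
--     for i in range(int(length)):
--         f1 = unorganized_factors[i]
--         f2 = unorganized_factors[len(unorganized_factors) - 1 - i]
--         factors.append((f1, f2))
--
--     return factors
--
-- def find_min_factor_pair(factors):
--     min_factor_sum = 0
--     for index, factor in enumerate(factors):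
--         if factor[0] + factor[1] < factors[min_factor_sum][0] + factors[min_factor_sum][1]:
--             min_factor_sum = index
--     return min_factor_sum
--
-- def generate_bf_number(number: int):
--     if number == 0 or number == 1:
--         return "" if number == 0 else "+"
--     min_factor_pair_index = 0
--     min_factor_sum = 20
--     decrement = -1
--
--     while min_factor_sum >= 20:
--         decrement += 1
--         if (number - decrement) == 0:
--             factors = find_factors(number)
--             min_factor_pair_index = find_min_factor_pair(factors)
--             break
--         factors = find_factors(number - decrement)
--         min_factor_pair_index = find_min_factor_pair(factors)
--         min_factor_sum = factors[min_factor_pair_index][0] + factors[min_factor_pair_index][1]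
--
--     min_factors = factors[min_factor_pair_index]
--     f1_string = "".join(["+" for i in range(min_factors[0])])
--     f2_string = "".join(["+" for i in range(min_factors[1])])
--     increment = "".join(["+" for i in range(decrement)])
--     return f"{f1_string}[->{f2_string}<]>{increment}"
-- ===== SOURCE B (Python) =====
-- def generate_bf_number(number: int):
--     if number == 0:
--         return ""
--     if number == 1:
--         return "+"
--     m = number
--     while True:
--         cands = []
--         d = 1
--         while d * d < m:
--             if m % d == 0:
--                 cands.append((d, m // d))
--             d += 1
--         f1, f2 = min(cands, key=lambda p: p[0] + p[1])
--         if f1 + f2 < 20: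
--             break
--         m -= 1
--     return "+" * f1 + "[->" + "+" * f2 + "<]>" + "+" * (number - m)
-- ===== Notes on version B (the rewrite author's own statement) =====
-- stated objective: faster
-- what changed: B replaces A's per-candidate full 1..m divisor enumeration with mirrored pairing and an index-tracking argmin by trial division up to sqrt(m) collecting (d, m//d) pairs directly and picking the best with min(..., key=sum).
import Mathlib
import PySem

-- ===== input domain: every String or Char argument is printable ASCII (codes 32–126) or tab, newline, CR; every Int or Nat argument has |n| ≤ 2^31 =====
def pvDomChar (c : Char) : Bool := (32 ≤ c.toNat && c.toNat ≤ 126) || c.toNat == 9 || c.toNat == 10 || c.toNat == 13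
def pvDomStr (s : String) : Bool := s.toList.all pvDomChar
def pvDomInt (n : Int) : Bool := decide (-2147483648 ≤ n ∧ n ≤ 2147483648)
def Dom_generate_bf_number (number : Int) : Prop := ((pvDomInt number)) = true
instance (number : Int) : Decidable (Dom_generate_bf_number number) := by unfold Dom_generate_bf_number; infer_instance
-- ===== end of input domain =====

-- B replaces A's full 1..m divisor enumeration with mirrored pairing and an index-tracking argmin
-- by trial division up to sqrt(m) plus min(..., key=sum); equal wherever A returns (A raises on negative input).

-- ===== PORT A =====
def find_factors (n : Int) : List (Int × Int) :=
  let unorganized : List Int :=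
    (PySem.List.pyRange 1 (n + 1) 1).foldl
      (fun acc i => if PySem.Int.mod n i = 0 then acc ++ [i] else acc) []
  -- length = len(...)/2 is a nonnegative float; int() truncates toward zero = Nat division by 2 (exact)
  (List.range (unorganized.length / 2)).foldl
    (fun acc (i : Nat) =>
      acc ++ [(PySem.List.pyGetD unorganized (i : Int) 0,
               PySem.List.pyGetD unorganized ((unorganized.length : Int) - 1 - (i : Int)) 0)]) []

def find_min_factor_pair (factors : List (Int × Int)) : Int :=
  (PySem.List.enumerate factors 0).foldl
    (fun mi p =>
      if p.2.1 + p.2.2 <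
          (PySem.List.pyGetD factors mi (0, 0)).1 + (PySem.List.pyGetD factors mi (0, 0)).2
      then p.1 else mi) 0

-- the while loop; fuel only makes it total (number.toNat + 2 steps are never exhausted when 0 ≤ number)
def bf_loop (number : Int) : Nat → Int → (List (Int × Int) × Int × Int)
  | 0, decrement => ([], 0, decrement)
  | fuel + 1, decrement =>
    let decrement := decrement + 1
    if number - decrement = 0 then
      let factors := find_factors number
      (factors, find_min_factor_pair factors, decrement)
    else
      let factors := find_factors (number - decrement)
      let idx := find_min_factor_pair factors
      let p := PySem.List.pyGetD factors idx (0, 0)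
      if 20 ≤ p.1 + p.2 then bf_loop number fuel decrement
      else (factors, idx, decrement)

def generate_bf_number (number : Int) : String :=
  if number = 0 ∨ number = 1 then (if number = 0 then "" else "+")
  else
    let r := bf_loop number (number.toNat + 2) (-1)
    let min_factors := PySem.List.pyGetD r.1 r.2.1 (0, 0)
    let f1_string := PySem.Str.join "" ((PySem.List.pyRange 0 min_factors.1 1).map (fun _ => "+"))
    let f2_string := PySem.Str.join "" ((PySem.List.pyRange 0 min_factors.2 1).map (fun _ => "+"))
    let increment := PySem.Str.join "" ((PySem.List.pyRange 0 r.2.2 1).map (fun _ => "+"))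
    f1_string ++ "[->" ++ f2_string ++ "<]>" ++ increment

-- ===== PORT B =====
-- inner 'while d * d < m' trial division collecting (d, m // d)
def bf_cands (m d : Int) : List (Int × Int) :=
  if h : d * d < m then
    (if PySem.Int.mod m d = 0 then [(d, PySem.Int.floordiv m d)] else []) ++ bf_cands m (d + 1)
  else []
termination_by (m - d).toNat
decreasing_by
  have hd : d < m := by nlinarith [sq_nonneg d, sq_nonneg (d - 1)]
  omega

-- "+" * k (empty for k ≤ 0; exact)
def plusRep (k : Int) : String := String.ofList (List.replicate k.toNat '+')

-- the 'while True' loop; fuel only makes it total (never exhausted when 2 ≤ m and m.toNat < fuel)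
def bf_pick : Nat → Int → (Int × Int × Int)
  | 0, m => (0, 0, m)
  | fuel + 1, m =>
    match PySem.List.min? (bf_cands m 1) (fun p => p.1 + p.2) with
    | none => (0, 0, m)
    | some p => if p.1 + p.2 < 20 then (p.1, p.2, m) else bf_pick fuel (m - 1)

def generate_bf_number_alt (number : Int) : String :=
  if number = 0 then ""
  else if number = 1 then "+"
  else
    let r := bf_pick (number.toNat + 2) number
    plusRep r.1 ++ "[->" ++ plusRep r.2.1 ++ "<]>" ++ plusRep (number - r.2.2)

-- ===== PRECONDITION & SPEC =====
-- A raises IndexError on every negative number (its empty factor list is indexed); B raises ValueError there too.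
def Pre_generate_bf_number (number : Int) : Prop := 0 ≤ number
instance (number : Int) : Decidable (Pre_generate_bf_number number) := by
  unfold Pre_generate_bf_number; infer_instance

def pvWitness_generate_bf_number : Int := 6

def Spec_generate_bf_number (number : Int) (out : String) : Prop := out = generate_bf_number_alt number
instance (number : Int) (out : String) : Decidable (Spec_generate_bf_number number out) := by
  unfold Spec_generate_bf_number; infer_instance

-- ===== CLAIM (what is proved, stated in full; the proofs are below) =====
def Claim_equal_generate_bf_number : Prop :=
  ∀ (number : Int), Dom_generate_bf_number number → Pre_generate_bf_number number →
    Spec_generate_bf_number number (generate_bf_number number)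

-- ===== LEMMAS AND PROOFS =====

-- the ascending list of positive divisors of m, as A's first loop builds it
def divList (m : Int) : List Int :=
  (PySem.List.pyRange 1 (m + 1) 1).filter (fun i => decide (PySem.Int.mod m i = 0))

theorem mem_divList {m x : Int} (hm : 1 ≤ m) : x ∈ divList m ↔ 1 ≤ x ∧ x ∣ m := by
  unfold divList
  simp [List.mem_filter, PySem.List.mem_pyRange_one, PySem.Int.mod_eq_zero_iff_dvd]
  intro h3 h1
  have := Int.le_of_dvd (by omega) h3
  omega

theorem pairwise_divList (m : Int) : (divList m).Pairwise (· < ·) :=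
  (PySem.List.pairwise_lt_pyRange_one 1 (m+1)).filter _

theorem nodup_divList (m : Int) : (divList m).Nodup :=
  (PySem.List.nodup_pyRange_one 1 (m+1)).filter _

theorem filter_eq_take {α : Type} (p : α → Bool) :
    ∀ (u : List α) (k : Nat), k ≤ u.length →
      (∀ i (hi : i < u.length), p u[i] = decide (i < k)) → u.filter p = u.take k := by
  intro u
  induction u with
  | nil => intro k _ _; simp
  | cons a t ih =>
    intro k hk h
    have h0 := h 0 (by simp)
    cases k with
    | zero =>
      simp at h0
      have : t.filter p = [] := by
        rw [ih 0 (by omega) (fun i hi => by simpa using h (i+1) (by simpa using Nat.succ_lt_succ hi))]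
        simp
      simp [List.filter_cons, h0, this]
    | succ j =>
      simp at h0 hk
      have ht := ih j (by omega) (fun i hi => by
        have := h (i+1) (by simpa using Nat.succ_lt_succ hi)
        simpa using this)
      simp [List.filter_cons, h0, ht]

theorem div_antitone {m a b : Int} (hm : 1 ≤ m) (ha : 1 ≤ a) (hab : a < b)
    (hda : a ∣ m) (hdb : b ∣ m) : m / b < m / a := by
  have ea : m / a * a = m := Int.ediv_mul_cancel hda
  have eb : m / b * b = m := Int.ediv_mul_cancel hdb
  have hpa : 1 ≤ m / a := by nlinarith
  have hpb : 1 ≤ m / b := by nlinarith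
  nlinarith

theorem div_pos_div {m a : Int} (hm : 1 ≤ m) (ha : 1 ≤ a) (hda : a ∣ m) :
    1 ≤ m / a ∧ (m / a) ∣ m ∧ m / (m / a) = a := by
  have ea : m / a * a = m := Int.ediv_mul_cancel hda
  have hpa : 1 ≤ m / a := by nlinarith
  refine ⟨hpa, Dvd.intro a (by linarith [ea]), ?_⟩
  · set e := m / a with he
    rw [← ea, Int.mul_ediv_cancel_left _ (by omega)]

theorem rev_divList {m : Int} (hm : 1 ≤ m) :
    (divList m).reverse = (divList m).map (fun d => m / d) := by
  have key : divList m = ((divList m).map (fun d => m / d)).reverse := by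
    apply List.Perm.eq_of_pairwise (le := fun a b : Int => a < b)
      (fun a b _ _ h1 h2 => absurd h2 (not_lt.mpr h1.le))
      (pairwise_divList m) ?pw ?perm
    case perm =>
      apply (List.perm_ext_iff_of_nodup (nodup_divList m) ?_).mpr
      · intro x
        rw [mem_divList hm]
        simp only [List.mem_reverse, List.mem_map]
        constructor
        · rintro ⟨h1, h2⟩
          exact ⟨m / x, by rw [mem_divList hm]
                           exact ⟨(div_pos_div hm h1 h2).1, (div_pos_div hm h1 h2).2.1⟩,
                 (div_pos_div hm h1 h2).2.2⟩
        · rintro ⟨d, hd, rfl⟩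
          rw [mem_divList hm] at hd
          exact ⟨(div_pos_div hm hd.1 hd.2).1, (div_pos_div hm hd.1 hd.2).2.1⟩
      · -- nodup of reversed map
        rw [List.nodup_reverse]
        apply List.Nodup.map_on ?_ (nodup_divList m)
        intro a ha b hb hab
        rw [mem_divList hm] at ha hb
        have := (div_pos_div hm ha.1 ha.2).2.2
        have := (div_pos_div hm hb.1 hb.2).2.2
        calc a = m / (m / a) := ((div_pos_div hm ha.1 ha.2).2.2).symm
          _ = m / (m / b) := by rw [hab]
          _ = b := (div_pos_div hm hb.1 hb.2).2.2
    case pw =>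
      rw [List.pairwise_reverse, List.pairwise_map]
      refine List.Pairwise.imp_of_mem ?_ (pairwise_divList m)
      intro a b ha hb hab
      rw [mem_divList hm] at ha hb
      exact div_antitone hm ha.1 hab ha.2 hb.2
  have h2 := congrArg List.reverse key
  rwa [List.reverse_reverse] at h2

theorem getElem_rev_divList {m : Int} (hm : 1 ≤ m) {i : Nat} (hi : i < (divList m).length) :
    (divList m)[(divList m).length - 1 - i]'(by omega) = m / (divList m)[i] := by
  have h2 : (divList m).reverse[i]? = ((divList m).map (fun d => m / d))[i]? := by
    rw [rev_divList hm]
  rw [List.getElem?_reverse (by simpa using hi), List.getElem?_map] at h2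
  rw [List.getElem?_eq_getElem (by omega), List.getElem?_eq_getElem hi] at h2
  simpa using h2

theorem sq_iff_half {m : Int} (hm : 1 ≤ m) {i : Nat} (hi : i < (divList m).length) :
    ((divList m)[i] * (divList m)[i] < m) ↔ i < (divList m).length / 2 := by
  set u := divList m with hu
  set L := u.length with hL
  have hx : u[i] ∈ u := List.getElem_mem _
  rw [mem_divList hm] at hx
  have ea : m / u[i] * u[i] = m := Int.ediv_mul_cancel hx.2
  have hpw := List.pairwise_iff_getElem.mp (pairwise_divList m)
  have hj : L - 1 - i < L := by omega
  have hrev : u[L - 1 - i]'hj = m / u[i] := getElem_rev_divList hm hi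
  have step1 : u[i] * u[i] < m ↔ u[i] < m / u[i] := by
    constructor
    · intro h
      have : u[i] * u[i] < m / u[i] * u[i] := by rw [ea]; exact h
      exact lt_of_mul_lt_mul_right this (by omega)
    · intro h
      calc u[i] * u[i] < m / u[i] * u[i] := by
            exact mul_lt_mul_of_pos_right h (by omega)
        _ = m := ea
  have step2 : u[i] < u[L - 1 - i]'hj ↔ i < L - 1 - i := by
    constructor
    · intro h
      by_contra hc
      push_neg at hc
      rcases Nat.lt_or_ge (L - 1 - i) i with h2 | h2
      · exact lt_asymm h (hpw (L - 1 - i) i hj hi h2)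
      · have hieq : i = L - 1 - i := by omega
        have heq : u[i]'hi = u[L - 1 - i]'hj := getElem_congr rfl hieq hi
        exact absurd (heq ▸ h) (lt_irrefl _)
    · intro h
      exact hpw i (L - 1 - i) hi hj h
  rw [step1, ← hrev, step2]
  omega

theorem find_factors_eq {m : Int} (hm : 1 ≤ m) :
    find_factors m = ((divList m).take ((divList m).length / 2)).map (fun d => (d, m / d)) := by
  have h1 : find_factors m = (List.range ((divList m).length / 2)).map
      (fun (i : Nat) => (PySem.List.pyGetD (divList m) (i : Int) 0,
                 PySem.List.pyGetD (divList m) (((divList m).length : Int) - 1 - (i : Int)) 0)) := by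
    simp only [find_factors, PySem.List.foldl_append_ite_eq_filter, List.nil_append,
      PySem.List.foldl_append_singleton_eq_map]
    rfl
  rw [h1]
  apply List.ext_getElem
  · simp [List.length_take]
    omega
  · intro i hi hi2
    have hiL : i < (divList m).length / 2 := by simpa using hi
    have hlt : i < (divList m).length := by omega
    simp only [List.getElem_map, List.getElem_range, List.getElem_take]
    have c1 : PySem.List.pyGetD (divList m) (i : Int) 0 = (divList m)[i] := by
      rw [PySem.List.pyGetD_natCast, List.getD_eq_getElem _ _ hlt]
    have hcast : (((divList m).length : Int) - 1 - (i : Int)) =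
        (((divList m).length - 1 - i : Nat) : Int) := by push_cast; omega
    have c2 : PySem.List.pyGetD (divList m) (((divList m).length : Int) - 1 - (i : Int)) 0 =
        m / (divList m)[i] := by
      rw [hcast, PySem.List.pyGetD_natCast, List.getD_eq_getElem _ _ (by omega)]
      exact getElem_rev_divList hm hlt
    rw [c1, c2]

theorem bf_cands_spec (m : Int) (hm : 1 ≤ m) : ∀ (k : Nat) (a : Int), 1 ≤ a →
    (m + 1 - a).toNat ≤ k →
    bf_cands m a = ((PySem.List.pyRange a (m + 1) 1).filter
        (fun d => decide (PySem.Int.mod m d = 0 ∧ d * d < m))).map (fun d => (d, m / d)) := by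
  intro k
  induction k with
  | zero =>
    intro a ha hk
    have hnil : PySem.List.pyRange a (m + 1) 1 = [] := PySem.List.pyRange_one_eq_nil (by omega)
    rw [bf_cands, hnil]
    have haa : a ≤ a * a := le_mul_of_one_le_left (by omega) ha
    have : ¬ a * a < m := by omega
    simp [this]
  | succ k ih =>
    intro a ha hk
    by_cases hlt : a * a < m
    · have haa : a ≤ a * a := le_mul_of_one_le_left (by omega) ha
      have ham : a < m + 1 := by omega
      rw [bf_cands, PySem.List.pyRange_one_cons (by omega)]
      rw [List.filter_cons]
      by_cases hmod : PySem.Int.mod m a = 0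
      · simp only [hlt, dif_pos, hmod, if_pos, hmod, decide_eq_true_eq]
        rw [ih (a + 1) (by omega) (by omega)]
        simp [hmod, hlt, PySem.Int.floordiv_eq_ediv_of_pos (by omega : (0:Int) < a)]
      · simp only [hlt, dif_pos]
        rw [ih (a + 1) (by omega) (by omega)]
        simp [hmod]
    · rw [bf_cands]
      simp only [hlt, dif_neg, not_false_iff]
      have : ((PySem.List.pyRange a (m + 1) 1).filter
          (fun d => decide (PySem.Int.mod m d = 0 ∧ d * d < m))) = [] := by
        apply List.filter_eq_nil_iff.mpr
        intro x hx
        rw [PySem.List.mem_pyRange_one] at hx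
        have hax : a * a ≤ x * x := mul_le_mul hx.1 hx.1 (by omega) (by omega)
        have : ¬ x * x < m := by omega
        simp [this]
      rw [this]
      simp

theorem bf_cands_eq {m : Int} (hm : 1 ≤ m) :
    bf_cands m 1 =
      ((divList m).filter (fun d => decide (d * d < m))).map (fun d => (d, m / d)) := by
  rw [bf_cands_spec m hm (m + 1 - 1).toNat 1 (by omega) (by omega)]
  unfold divList
  rw [List.filter_filter]
  congr 1
  apply List.filter_congr
  intro x _
  rw [Bool.and_comm]
  simp

theorem take_divList {m : Int} (hm : 1 ≤ m) :
    (divList m).filter (fun d => decide (d * d < m)) =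
      (divList m).take ((divList m).length / 2) := by
  apply filter_eq_take _ _ _ (by omega)
  intro i hi
  by_cases h : i < (divList m).length / 2
  · simp [h, (sq_iff_half hm hi).mpr h]
  · simp only [h, decide_false]
    simp only [decide_eq_false_iff_not]
    intro hc
    exact h ((sq_iff_half hm hi).mp hc)

theorem min?_cons : ∀ (t : List (Int × Int)) (x : Int × Int),
    PySem.List.min? (x :: t) (fun p => p.1 + p.2) =
      some (t.foldl (fun mp p => if p.1 + p.2 < mp.1 + mp.2 then p else mp) x) := by
  intro t
  induction t with
  | nil => intro x; rfl
  | cons y ys ih =>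
    intro x
    have step : PySem.List.min? (x :: y :: ys) (fun p => p.1 + p.2) =
        PySem.List.min? ((if y.1 + y.2 < x.1 + x.2 then y else x) :: ys) (fun p => p.1 + p.2) := by
      by_cases h : y.1 + y.2 < x.1 + x.2 <;>
        simp only [PySem.List.min?, List.foldl_cons] <;> simp [h]
    rw [step, ih]
    simp only [List.foldl_cons]

theorem fold_idx (fs : List (Int × Int)) :
    ∀ (l : List (Int × (Int × Int))) (mi : Int),
      (∀ p ∈ l, 0 ≤ p.1 ∧ p.1 < (fs.length : Int) ∧ PySem.List.pyGetD fs p.1 (0, 0) = p.2) →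
      0 ≤ mi → mi < (fs.length : Int) →
      (0 ≤ l.foldl (fun mi p =>
          if p.2.1 + p.2.2 <
              (PySem.List.pyGetD fs mi (0, 0)).1 + (PySem.List.pyGetD fs mi (0, 0)).2
          then p.1 else mi) mi ∧
        l.foldl (fun mi p =>
          if p.2.1 + p.2.2 <
              (PySem.List.pyGetD fs mi (0, 0)).1 + (PySem.List.pyGetD fs mi (0, 0)).2
          then p.1 else mi) mi < (fs.length : Int)) ∧
      PySem.List.pyGetD fs (l.foldl (fun mi p =>
          if p.2.1 + p.2.2 <
              (PySem.List.pyGetD fs mi (0, 0)).1 + (PySem.List.pyGetD fs mi (0, 0)).2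
          then p.1 else mi) mi) (0, 0) =
        l.foldl (fun mp p => if p.2.1 + p.2.2 < mp.1 + mp.2 then p.2 else mp)
          (PySem.List.pyGetD fs mi (0, 0)) := by
  intro l
  induction l with
  | nil => intro mi _ h0 h1; exact ⟨⟨h0, h1⟩, rfl⟩
  | cons q qs ih =>
    intro mi hmem h0 h1
    simp only [List.foldl_cons]
    obtain ⟨hq0, hq1, hq2⟩ := hmem q (by simp)
    by_cases h : q.2.1 + q.2.2 <
        (PySem.List.pyGetD fs mi (0, 0)).1 + (PySem.List.pyGetD fs mi (0, 0)).2
    · simp only [h, if_pos]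
      have := ih q.1 (fun p hp => hmem p (by simp [hp])) hq0 hq1
      rw [hq2] at this
      exact this
    · simp only [h, if_neg, not_false_iff]
      exact ih mi (fun p hp => hmem p (by simp [hp])) h0 h1

theorem fmfp_sel (fs : List (Int × Int)) (hne : fs ≠ []) :
    PySem.List.min? fs (fun p => p.1 + p.2) =
      some (PySem.List.pyGetD fs (find_min_factor_pair fs) (0, 0)) := by
  obtain ⟨x, t, rfl⟩ := List.exists_cons_of_ne_nil hne
  rw [min?_cons]
  unfold find_min_factor_pair
  rw [PySem.List.enumerate_cons, List.foldl_cons]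
  have h00 : PySem.List.pyGetD (x :: t) 0 (0, 0) = x := PySem.List.pyGetD_zero_cons x t (0, 0)
  rw [h00, if_neg (lt_irrefl _)]
  simp only [zero_add]
  have hfold := (fold_idx (x :: t) (PySem.List.enumerate t 1) 0 ?_ (by omega) (by simp)).2
  · rw [h00] at hfold
    rw [hfold]
    congr 1
    -- fold over enumerate using only .2 is fold over t
    have : (PySem.List.enumerate t 1).foldl
        (fun mp p => if p.2.1 + p.2.2 < mp.1 + mp.2 then p.2 else mp) x =
        ((PySem.List.enumerate t 1).map (·.2)).foldl
          (fun mp p => if p.1 + p.2 < mp.1 + mp.2 then p else mp) x := by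
      rw [List.foldl_map]
    rw [this, PySem.List.map_snd_enumerate]
  · intro p hp
    rw [PySem.List.mem_enumerate_iff] at hp
    obtain ⟨k, hk, rfl⟩ := hp
    refine ⟨by omega, by simp; omega, ?_⟩
    have hcast : (1 + (k : Int)) = ((k + 1 : Nat) : Int) := by push_cast; omega
    rw [hcast, PySem.List.pyGetD_natCast]
    rw [List.getD_eq_getElem _ _ (by simpa using Nat.succ_lt_succ hk)]
    simp

theorem bf_cands_eq_find_factors {m : Int} (hm : 1 ≤ m) : bf_cands m 1 = find_factors m := by
  rw [bf_cands_eq hm, take_divList hm, find_factors_eq hm]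

theorem find_factors_ne_nil {m : Int} (hm : 2 ≤ m) : find_factors m ≠ [] := by
  rw [find_factors_eq (by omega)]
  have h1 : (1 : Int) ∈ divList m := (mem_divList (by omega)).mpr ⟨le_refl 1, one_dvd m⟩
  have h2 : m ∈ divList m := (mem_divList (by omega)).mpr ⟨by omega, dvd_refl m⟩
  have hL : 2 ≤ (divList m).length := by
    rcases hu : divList m with _ | ⟨a, _ | ⟨b, rest⟩⟩
    · rw [hu] at h1; simp at h1
    · rw [hu] at h1 h2
      simp at h1 h2
      omega
    · simp
  have : (((divList m).take ((divList m).length / 2)).map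
      (fun d => (d, m / d))).length = (divList m).length / 2 := by
    simp [List.length_take]
    omega
  intro hc
  rw [hc] at this
  simp at this
  omega

theorem loop_eq (fuel : Nat) : ∀ (number decrement : Int),
    2 ≤ number - (decrement + 1) → (number - (decrement + 1)).toNat ≤ fuel →
    (PySem.List.pyGetD (bf_loop number fuel decrement).1 (bf_loop number fuel decrement).2.1 (0, 0),
      (bf_loop number fuel decrement).2.2) =
    (((bf_pick fuel (number - (decrement + 1))).1, (bf_pick fuel (number - (decrement + 1))).2.1),
      number - (bf_pick fuel (number - (decrement + 1))).2.2) := by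
  induction fuel with
  | zero => intro number decrement h2 hf; omega
  | succ fuel ih =>
    intro number decrement h2 hf
    have hm1 : (1 : Int) ≤ number - (decrement + 1) := by omega
    have hne := find_factors_ne_nil (show 2 ≤ number - (decrement + 1) by omega)
    have hsel := fmfp_sel (find_factors (number - (decrement + 1))) hne
    have hA : bf_loop number (fuel + 1) decrement =
        (if 20 ≤ (PySem.List.pyGetD (find_factors (number - (decrement + 1)))
              (find_min_factor_pair (find_factors (number - (decrement + 1)))) (0, 0)).1 +
            (PySem.List.pyGetD (find_factors (number - (decrement + 1)))
              (find_min_factor_pair (find_factors (number - (decrement + 1)))) (0, 0)).2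
         then bf_loop number fuel (decrement + 1)
         else (find_factors (number - (decrement + 1)),
               find_min_factor_pair (find_factors (number - (decrement + 1))), decrement + 1)) := by
      simp only [bf_loop]
      rw [if_neg (by omega : ¬ number - (decrement + 1) = 0)]
    have hB : bf_pick (fuel + 1) (number - (decrement + 1)) =
        (if (PySem.List.pyGetD (find_factors (number - (decrement + 1)))
              (find_min_factor_pair (find_factors (number - (decrement + 1)))) (0, 0)).1 +
            (PySem.List.pyGetD (find_factors (number - (decrement + 1)))
              (find_min_factor_pair (find_factors (number - (decrement + 1)))) (0, 0)).2 < 20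
         then ((PySem.List.pyGetD (find_factors (number - (decrement + 1)))
              (find_min_factor_pair (find_factors (number - (decrement + 1)))) (0, 0)).1,
               (PySem.List.pyGetD (find_factors (number - (decrement + 1)))
              (find_min_factor_pair (find_factors (number - (decrement + 1)))) (0, 0)).2,
               number - (decrement + 1))
         else bf_pick fuel (number - (decrement + 1) - 1)) := by
      simp only [bf_pick]
      rw [bf_cands_eq_find_factors hm1, hsel]
    by_cases hs : (PySem.List.pyGetD (find_factors (number - (decrement + 1)))
          (find_min_factor_pair (find_factors (number - (decrement + 1)))) (0, 0)).1 +
        (PySem.List.pyGetD (find_factors (number - (decrement + 1)))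
          (find_min_factor_pair (find_factors (number - (decrement + 1)))) (0, 0)).2 < 20
    · rw [hA, if_neg (by omega), hB, if_pos hs]
      simp
    · rw [hA, if_pos (by omega), hB, if_neg hs]
      have hm3 : 3 ≤ number - (decrement + 1) := by
        by_contra hc
        have hm2 : number - (decrement + 1) = 2 := by omega
        rw [hm2] at hs
        exact hs (by decide)
      have := ih number (decrement + 1) (by omega) (by omega)
      have harith : number - (decrement + 1 + 1) = number - (decrement + 1) - 1 := by ring
      rw [harith] at this
      exact this

theorem plus_join (k : Int) :
    PySem.Str.join "" ((PySem.List.pyRange 0 k 1).map (fun _ => "+")) = plusRep k := by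
  apply String.toList_inj.mp
  have h1 : (PySem.List.pyRange 0 k 1).map (fun _ => "+") = List.replicate k.toNat "+" := by
    refine List.eq_replicate_iff.mpr ⟨?_, ?_⟩
    · simp [PySem.List.length_pyRange_one]
    · intro b hb
      simp at hb
      exact hb.2
  rw [h1, PySem.Str.toList_join]
  have h2 : (List.replicate k.toNat "+").map String.toList =
      (List.replicate k.toNat '+').map (fun c => [c]) := by
    simp [List.map_replicate]
  have h3 : ("" : String).toList = [] := rfl
  rw [h2, h3, PySem.Chars.join_nil_singletons]
  simp [plusRep]

-- ===== VERDICT (by name: the statement is the Claim_ definition above) =====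
theorem generate_bf_number_spec : Claim_equal_generate_bf_number := by
  intro number _ hpre
  unfold Spec_generate_bf_number
  unfold Pre_generate_bf_number at hpre
  by_cases h0 : number = 0
  · subst h0; rfl
  · by_cases h1 : number = 1
    · subst h1; rfl
    · have hnum : 2 ≤ number := by omega
      have key := loop_eq (number.toNat + 2) number (-1) (by omega) (by omega)
      have hm0 : number - (-1 + 1) = number := by ring
      rw [hm0] at key
      have k1 := congrArg (fun t : (Int × Int) × Int => t.1.1) key
      have k2 := congrArg (fun t : (Int × Int) × Int => t.1.2) key
      have k3 := congrArg (fun t : (Int × Int) × Int => t.2) key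
      simp only at k1 k2 k3
      simp only [generate_bf_number, generate_bf_number_alt, if_neg h0, if_neg h1,
        if_neg (show ¬ (number = 0 ∨ number = 1) by tauto)]
      rw [plus_join, plus_join, plus_join, k1, k2, k3]
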